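-- pv_equiv track=rewrite | github.com/Smrutishreya2002/IR-Model-Evaluation | E_Evaluation/b_top10results2.py | boolean_retrieve
-- ===== SOURCE A (Python) =====
-- def boolean_retrieve(query_terms, index):
--     postings = []
--     for term in query_terms:
--         if term in index:
--             postings.append(set(index[term]))
--     if not postings:
--         return []
--     return sorted(set.intersection(*postings))  # simple AND
-- ===== SOURCE B (Python) =====
-- def boolean_retrieve(query_terms, index):
--     matched = [set(index[t]) for t in query_terms if t in index]
--     n = len(matched)
--     if n == 0:
--         return []
--     counts = {}
--     for s in matched:
--         for doc in s:
--             counts[doc] = counts.get(doc, 0) + 1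
--     return sorted(doc for doc, c in counts.items() if c == n)
-- ===== Notes on version B (the rewrite author's own statement) =====
-- stated objective: alternative
-- what changed: Replaces the multi-way set.intersection of posting sets by a single counting pass: each deduplicated posting set increments a per-document counter, and documents whose count equals the number of matched sets are collected and sorted.
import Mathlib
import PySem

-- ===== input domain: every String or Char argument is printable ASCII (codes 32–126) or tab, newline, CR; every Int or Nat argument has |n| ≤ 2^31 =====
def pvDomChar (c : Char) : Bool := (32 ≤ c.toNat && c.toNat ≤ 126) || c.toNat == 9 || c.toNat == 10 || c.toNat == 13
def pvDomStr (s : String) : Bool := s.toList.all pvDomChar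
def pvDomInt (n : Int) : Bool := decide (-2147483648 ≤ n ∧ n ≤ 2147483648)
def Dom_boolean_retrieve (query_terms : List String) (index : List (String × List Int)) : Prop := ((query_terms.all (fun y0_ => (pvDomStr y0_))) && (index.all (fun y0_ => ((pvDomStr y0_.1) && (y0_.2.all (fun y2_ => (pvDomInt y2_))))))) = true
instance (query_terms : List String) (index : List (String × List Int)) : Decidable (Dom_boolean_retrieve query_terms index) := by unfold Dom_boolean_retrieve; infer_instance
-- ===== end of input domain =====

-- B replaces the multi-way set intersection by one counting pass over the matched posting sets (alternative algorithm, same cost).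

-- ===== PORT A =====
-- postings loop, then sorted(set.intersection(*postings))
def boolean_retrieve (query_terms : List String) (index : List (String × List Int)) : List Int :=
  let d := PySem.Dict.ofList index
  let postings : List (PySem.Set Int) :=
    query_terms.foldl (fun ps term =>
      if d.contains term then ps ++ [PySem.Set.ofList (d.getD term [])] else ps) []
  match postings with
  | [] => []
  | hd :: tl => PySem.List.sorted (tl.foldl PySem.Set.inter hd) (fun x => x) false

-- ===== PORT B =====
def boolean_retrieve_alt (query_terms : List String) (index : List (String × List Int)) : List Int :=
  let d := PySem.Dict.ofList index
  let matched : List (PySem.Set Int) :=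
    (query_terms.filter (fun t => d.contains t)).map (fun t => PySem.Set.ofList (d.getD t []))
  let n := matched.length
  if n = 0 then []
  else
    let counts : PySem.Dict Int Int :=
      matched.foldl (fun c s => s.foldl (fun c doc => c.modify doc 0 (· + 1)) c) PySem.Dict.empty
    PySem.List.sorted ((counts.items.filter (fun p => p.2 == (n : Int))).map (·.1)) (fun x => x) false

-- ===== PRECONDITION & SPEC =====
def Spec_boolean_retrieve (query_terms : List String) (index : List (String × List Int)) (out : List Int) : Prop := out = boolean_retrieve_alt query_terms index
instance (query_terms : List String) (index : List (String × List Int)) (out : List Int) : Decidable (Spec_boolean_retrieve query_terms index out) := by unfold Spec_boolean_retrieve; infer_instance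

-- ===== CLAIM (what is proved, stated in full; the proofs are below) =====
def Claim_equal_boolean_retrieve : Prop := ∀ (query_terms : List String) (index : List (String × List Int)), Dom_boolean_retrieve query_terms index → Spec_boolean_retrieve query_terms index (boolean_retrieve query_terms index)

-- ===== LEMMAS AND PROOFS =====

-- A's append loop builds exactly B's filter+map list.
theorem postings_eq_matched (qts : List String) (d : PySem.Dict String (List Int)) :
    qts.foldl (fun ps term =>
      if d.contains term then ps ++ [PySem.Set.ofList (d.getD term [])] else ps) ([] : List (PySem.Set Int))
      = (qts.filter (fun t => d.contains t)).map (fun t => PySem.Set.ofList (d.getD t [])) := by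
  rw [PySem.List.foldl_append_if]; simp

theorem mem_interFold (l : List (PySem.Set Int)) (s : PySem.Set Int) (x : Int) :
    x ∈ l.foldl PySem.Set.inter s ↔ x ∈ s ∧ ∀ t ∈ l, x ∈ t := by
  induction l generalizing s with
  | nil => simp
  | cons a l ih => simp [List.foldl_cons, ih, PySem.Set.mem_inter]; tauto

theorem nodup_interFold (l : List (PySem.Set Int)) (s : PySem.Set Int) (h : s.Nodup) :
    (l.foldl PySem.Set.inter s).Nodup := by
  induction l generalizing s with
  | nil => exact h
  | cons a l ih => exact ih _ (PySem.Set.nodup_inter s a h)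

theorem count_le_one_nodup (a : List Int) (x : Int) (h : a.Nodup) : a.count x ≤ 1 := by
  rcases Nat.lt_or_ge (a.count x) 2 with h1 | h1
  · omega
  · exact absurd h ((List.duplicate_iff_two_le_count).mpr h1).not_nodup

theorem count_flatten_le (L : List (List Int)) (x : Int) (h : ∀ s ∈ L, s.Nodup) :
    L.flatten.count x ≤ L.length := by
  induction L with
  | nil => simp
  | cons a L ih =>
    simp only [List.flatten_cons, List.count_append, List.length_cons]
    have ha := count_le_one_nodup a x (h a (by simp))
    have := ih (fun s hs => h s (by simp [hs]))
    omega

theorem count_flatten_eq_length_iff (L : List (List Int)) (x : Int)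
    (h : ∀ s ∈ L, s.Nodup) :
    (L.flatten.count x = L.length) ↔ ∀ s ∈ L, x ∈ s := by
  induction L with
  | nil => simp
  | cons a L ih =>
    simp only [List.flatten_cons, List.count_append, List.length_cons, List.mem_cons]
    have ha := count_le_one_nodup a x (h a (by simp))
    have hle := count_flatten_le L x (fun s hs => h s (by simp [hs]))
    have hih := ih (fun s hs => h s (by simp [hs]))
    constructor
    · intro he
      have h1 : a.count x = 1 := by omega
      have h2 : L.flatten.count x = L.length := by omega
      intro s hs
      rcases hs with rfl | hs
      · exact List.count_pos_iff.mp (by omega)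
      · exact (hih.mp h2) s hs
    · intro hall
      have hxa : x ∈ a := hall a (Or.inl rfl)
      have h1 : a.count x = 1 := Nat.le_antisymm ha (List.one_le_count_iff.mpr hxa)
      have h2 : L.flatten.count x = L.length := hih.mpr (fun s hs => hall s (Or.inr hs))
      omega

-- core: for a nonempty list of Nodup sets, sorted intersection = sorted count-filtered keys
theorem core_eq (hd1 : PySem.Set Int) (tl : List (PySem.Set Int))
    (hnd : ∀ s ∈ hd1 :: tl, List.Nodup s) :
    PySem.List.sorted (tl.foldl PySem.Set.inter hd1) (fun x => x) false
      = PySem.List.sorted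
          (((PySem.Dict.counter (hd1 :: tl).flatten).items.filter
              (fun p => p.2 == ((tl.length + 1 : Nat) : Int))).map (·.1)) (fun x => x) false := by
  have hkeys : (((PySem.Dict.counter (hd1 :: tl).flatten).items.filter
        (fun p => p.2 == ((tl.length + 1 : Nat) : Int))).map (·.1))
      = (PySem.Set.ofList (hd1 :: tl).flatten).filter
          (fun k => ((hd1 :: tl).flatten.count k : Int) == ((tl.length + 1 : Nat) : Int)) := by
    rw [PySem.Dict.items_counter, List.filter_map, List.map_map]
    simp only [Function.comp_def]
    exact List.map_id' _
  rw [hkeys]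
  apply PySem.List.sorted_eq_sorted_of_perm _ _ _ (fun a b h => h)
  rw [List.perm_ext_iff_of_nodup]
  · intro x
    rw [mem_interFold, List.mem_filter, PySem.Set.mem_ofList]
    have hcnt := count_flatten_eq_length_iff (hd1 :: tl) x hnd
    simp only [List.length_cons] at hcnt
    constructor
    · rintro ⟨hx1, hxt⟩
      have hall : ∀ s ∈ hd1 :: tl, x ∈ s := by
        intro s hs
        rw [List.mem_cons] at hs
        rcases hs with rfl | hs
        · exact hx1
        · exact hxt s hs
      refine ⟨List.mem_flatten.mpr ⟨hd1, by simp, hx1⟩, ?_⟩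
      simp only [beq_iff_eq]
      exact_mod_cast hcnt.mpr hall
    · rintro ⟨hxF, hc⟩
      simp only [beq_iff_eq] at hc
      have hc' : (hd1 :: tl).flatten.count x = tl.length + 1 := by exact_mod_cast hc
      have hall := hcnt.mp hc'
      exact ⟨hall hd1 (by simp), fun t ht => hall t (by simp [ht])⟩
  · exact nodup_interFold tl hd1 (hnd hd1 (by simp))
  · exact (PySem.Set.nodup_ofList _).filter _

theorem matched_nodup (qts : List String) (d : PySem.Dict String (List Int)) :
    ∀ s ∈ (qts.filter (fun t => d.contains t)).map (fun t => PySem.Set.ofList (d.getD t [])), List.Nodup s := by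
  intro s hs
  simp only [List.mem_map] at hs
  obtain ⟨t, -, rfl⟩ := hs
  exact PySem.Set.nodup_ofList _

-- ===== VERDICT (by name: the statement is the Claim_ definition above) =====
theorem boolean_retrieve_spec : Claim_equal_boolean_retrieve := by
  intro qts index _
  unfold Spec_boolean_retrieve boolean_retrieve boolean_retrieve_alt
  simp only [postings_eq_matched]
  have hnd := matched_nodup qts (PySem.Dict.ofList index)
  generalize hM : (qts.filter (fun t => (PySem.Dict.ofList index).contains t)).map
      (fun t => PySem.Set.ofList ((PySem.Dict.ofList index).getD t [])) = matched at *
  match matched, hnd with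
  | [], _ => simp
  | hd1 :: tl, hnd =>
    simp only [List.length_cons, if_neg (Nat.succ_ne_zero tl.length)]
    have hcounter : (hd1 :: tl).foldl (fun c s => s.foldl (fun c doc => c.modify doc 0 (· + 1)) c) PySem.Dict.empty
        = PySem.Dict.counter (hd1 :: tl).flatten := by
      rw [PySem.Dict.counter_eq_foldl, List.foldl_flatten]
    rw [hcounter]
    exact core_eq hd1 tl hnd
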